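-- pv_equiv track=rewrite | github.com/michal-szyba/challenge-party_people | main.py | party_people
-- ===== SOURCE A (Python) =====
-- def party_people(list_people, people_counter=0):
--     if len(list_people) == 0:
--         return people_counter
--     min_req = min(list_people)
--     if min_req <= people_counter+1:
--         list_people.remove(min_req)
--         people_counter += 1
--         return party_people(list_people, people_counter)
--     return people_counter
-- ===== SOURCE B (Python) =====
-- def party_people(list_people, people_counter=0):
--     for v in sorted(list_people):
--         if v > people_counter + 1:
--             break
--         people_counter += 1
--     return people_counter
-- ===== Notes on version B (the rewrite author's own statement) =====
-- stated objective: faster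
-- what changed: replaces the recursive repeated min()+remove() passes (quadratic) with one ascending sort followed by a single linear scan that admits while value <= counter+1 and breaks otherwise
import Mathlib
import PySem

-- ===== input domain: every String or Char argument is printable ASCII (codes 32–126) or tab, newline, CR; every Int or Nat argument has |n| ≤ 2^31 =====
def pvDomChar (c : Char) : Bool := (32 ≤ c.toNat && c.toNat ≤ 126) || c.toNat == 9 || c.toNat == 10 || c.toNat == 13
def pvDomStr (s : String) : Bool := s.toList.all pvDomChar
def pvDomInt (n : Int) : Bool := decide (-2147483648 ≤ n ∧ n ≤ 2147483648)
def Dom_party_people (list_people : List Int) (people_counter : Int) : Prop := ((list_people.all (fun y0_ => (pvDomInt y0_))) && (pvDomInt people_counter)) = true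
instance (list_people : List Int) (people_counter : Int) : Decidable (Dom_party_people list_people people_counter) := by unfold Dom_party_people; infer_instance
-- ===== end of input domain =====

-- B replaces A's recursive min()+remove() passes with one sort and a single scan (faster).
-- A mutates its list argument in place (list.remove); the equivalence proved here is about the return value only.

-- ===== PORT A =====
def party_people (list_people : List Int) (people_counter : Int) : Int :=
  if list_people.length = 0 then people_counter
  else
    match hm : PySem.List.min? list_people (fun x => x) with
    | none => people_counter   -- unreachable: the list is nonempty here
    | some min_req =>
      if min_req ≤ people_counter + 1 then
        party_people ((PySem.List.remove? list_people min_req).getD []) (people_counter + 1)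
      else people_counter
termination_by list_people.length
decreasing_by
  have hmem := PySem.List.min?_mem hm
  rw [PySem.List.remove?_eq_some_erase _ _ hmem]
  have hpos : 0 < list_people.length := List.length_pos_of_mem hmem
  have := List.length_erase_of_mem hmem
  simp only [Option.getD_some, this]
  omega

-- ===== PORT B =====
-- the for-loop with break over sorted(list_people)
def ppScan : List Int → Int → Int
  | [], c => c
  | v :: rest, c => if v > c + 1 then c else ppScan rest (c + 1)

def party_people_alt (list_people : List Int) (people_counter : Int) : Int :=
  ppScan (PySem.List.sorted list_people (fun x => x) false) people_counter

-- ===== PRECONDITION & SPEC =====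
def Spec_party_people (list_people : List Int) (people_counter : Int) (out : Int) : Prop := out = party_people_alt list_people people_counter
instance (list_people : List Int) (people_counter : Int) (out : Int) : Decidable (Spec_party_people list_people people_counter out) := by unfold Spec_party_people; infer_instance

-- ===== CLAIM (what is proved, stated in full; the proofs are below) =====
def Claim_equal_party_people : Prop := ∀ (list_people : List Int) (people_counter : Int), Dom_party_people list_people people_counter → Spec_party_people list_people people_counter (party_people list_people people_counter)

-- ===== LEMMAS AND PROOFS =====

-- sorted l decomposes as (first minimum) :: sorted (l minus that minimum)
theorem sorted_cons_min {l : List Int} {m : Int}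
    (hm : PySem.List.min? l (fun x => x) = some m) :
    PySem.List.sorted l (fun x => x) false = m :: PySem.List.sorted (l.erase m) (fun x => x) false := by
  have hmem : m ∈ l := PySem.List.min?_mem hm
  have hmin : ∀ y ∈ l, m ≤ y := fun y hy => PySem.List.min?_isMin hm y hy
  have hperm : (m :: l.erase m).Perm l := (List.perm_cons_erase hmem).symm
  -- the right-hand side is a permutation of l that is pairwise ≤
  refine PySem.List.sorted_id_eq_of_perm_of_pairwise l _ ?_ ?_
  · exact ((PySem.List.sorted_perm (l.erase m) (fun x => x) false).cons m).trans hperm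
  · refine List.Pairwise.cons ?_ (PySem.List.sorted_pairwise (l.erase m) (fun x => x))
    intro y hy
    exact hmin y (List.mem_of_mem_erase ((PySem.List.mem_sorted _ _ _ _).1 hy))

theorem party_people_eq_scan (n : Nat) :
    ∀ (l : List Int), l.length ≤ n → ∀ c : Int,
      party_people l c = ppScan (PySem.List.sorted l (fun x => x) false) c := by
  induction n with
  | zero =>
    intro l hl c
    have : l = [] := List.length_eq_zero_iff.1 (Nat.le_zero.1 hl)
    subst this
    rw [party_people.eq_def]; simp [PySem.List.sorted, ppScan]
  | succ n ih =>
    intro l hl c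
    rw [party_people.eq_def]
    by_cases h0 : l.length = 0
    · have : l = [] := List.length_eq_zero_iff.1 h0
      subst this
      simp [PySem.List.sorted, ppScan]
    · simp only [if_neg h0]
      have hne : l ≠ [] := fun h => h0 (by simp [h])
      split
      · next hm =>
        exact absurd ((PySem.List.min?_eq_none_iff l (fun x => x)).1 hm) hne
      · next m hm =>
        have hmem : m ∈ l := PySem.List.min?_mem hm
        rw [sorted_cons_min hm, PySem.List.remove?_eq_some_erase _ _ hmem]
        have hlen : (l.erase m).length ≤ n := by
          have h1 := List.length_erase_of_mem hmem
          have h2 : 0 < l.length := List.length_pos_of_mem hmem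
          omega
        by_cases hle : m ≤ c + 1
        · rw [if_pos hle, Option.getD_some, ih (l.erase m) hlen (c + 1), ppScan,
            if_neg (by omega)]
        · rw [if_neg hle, ppScan, if_pos (by omega)]

-- ===== VERDICT (by name: the statement is the Claim_ definition above) =====
theorem party_people_spec : Claim_equal_party_people := by
  intro l c _
  unfold Spec_party_people party_people_alt
  exact party_people_eq_scan l.length l (le_refl _) c
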